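-- pv_equiv track=rewrite | github.com/rusanovalexander/WBLA | core/llm_client.py | _sanitize_response_text
-- ===== SOURCE A (Python) =====
-- def _sanitize_response_text(text: str) -> str:
--     """
--     Fix character-per-line fragmentation in Gemini responses.
--
--     When Gemini's multi-turn tool-calling response or streaming mode produces
--     text with one character per Part, the joined result has one char per line.
--     Real-world fragmentation often mixes single-char lines with short tokens
--     (e.g., "1.9", "46", "220", "[", "]") so we detect runs of very short
--     lines (≤3 chars) rather than strictly single-char lines.
--
--     This function detects and reassembles such fragmented regions while
--     preserving intentionally short lines (e.g., blank lines, bullet markers).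
--     """
--     if not text:
--         return text
--
--     lines = text.split('\n')
--
--     # Quick check: count consecutive very-short non-empty lines (≤3 chars).
--     # If we find 8+ in a row, there's likely fragmentation.
--     consecutive = 0
--     has_fragmentation = False
--     for line in lines:
--         stripped = line.strip()
--         if 1 <= len(stripped) <= 3:
--             consecutive += 1
--             if consecutive >= 8:
--                 has_fragmentation = True
--                 break
--         else:
--             consecutive = 0
--
--     if not has_fragmentation:
--         return text
--
--     # Reassemble fragmented regions
--     result_lines: list[str] = []
--     i = 0
--     while i < len(lines):
--         # Detect start of a fragmented region: 8+ consecutive short lines (1-3 chars, non-empty)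
--         fragment_start = i
--         while i < len(lines):
--             stripped = lines[i].strip()
--             if 1 <= len(stripped) <= 3:
--                 i += 1
--             else:
--                 break
--
--         fragment_length = i - fragment_start
--
--         if fragment_length >= 8:
--             # Reassemble: join all short fragments into one string
--             chars = ''.join(lines[j].strip() for j in range(fragment_start, i))
--             result_lines.append(chars)
--         else:
--             # Not a fragmented region — keep original lines
--             for j in range(fragment_start, i):
--                 result_lines.append(lines[j])
--
--         # Process the next normal line
--         if i < len(lines):
--             stripped = lines[i].strip()
--             if len(stripped) == 0 or len(stripped) > 3:
--                 result_lines.append(lines[i])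
--                 i += 1
--
--     return '\n'.join(result_lines)
-- ===== SOURCE B (Python) =====
-- def _sanitize_response_text(text: str) -> str:
--     """Single-pass run accumulator: group the lines into runs of very short
--     (1-3 chars stripped) lines; a run of 8+ is joined into one line, anything
--     else is kept verbatim."""
--     out: list[str] = []
--     run: list[str] = []  # pending consecutive very-short lines
--
--     def flush() -> None:
--         if len(run) >= 8:
--             out.append(''.join(ln.strip() for ln in run))
--         else:
--             out.extend(run)
--         run.clear()
--
--     for line in text.split('\n'):
--         if 1 <= len(line.strip()) <= 3:
--             run.append(line)
--         else:
--             flush()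
--             out.append(line)
--     flush()
--     return '\n'.join(out)
-- ===== Notes on version B (the rewrite author's own statement) =====
-- stated objective: simpler
-- what changed: Replaced A's two-phase design (a separate fragmentation-detection pass with early return, then an index-driven while-loop reassembly) by one single pass that groups consecutive very-short lines into a pending run and flushes each run as either one joined line (run >= 8) or verbatim.
import Mathlib
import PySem

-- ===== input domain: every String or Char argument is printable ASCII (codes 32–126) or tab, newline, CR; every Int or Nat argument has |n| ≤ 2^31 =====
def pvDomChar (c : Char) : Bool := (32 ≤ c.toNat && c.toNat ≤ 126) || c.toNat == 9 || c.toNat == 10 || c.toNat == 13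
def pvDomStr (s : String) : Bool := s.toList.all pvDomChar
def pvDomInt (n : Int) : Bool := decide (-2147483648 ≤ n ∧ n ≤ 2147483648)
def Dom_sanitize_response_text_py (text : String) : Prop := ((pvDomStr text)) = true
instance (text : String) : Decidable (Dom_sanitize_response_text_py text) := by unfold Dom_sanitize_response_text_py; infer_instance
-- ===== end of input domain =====

-- B replaces A's two-phase design (detection pass with early return + index-driven
-- reassembly loop) by a single pass over the lines with a pending-run accumulator (objective: simpler).

-- ===== PORT A =====
-- 'stripped = line.strip(); 1 <= len(stripped) <= 3' — used verbatim in both of A's loops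
def aShort (line : String) : Bool :=
  let stripped := PySem.Str.strip line
  1 ≤ PySem.Str.len stripped && PySem.Str.len stripped ≤ 3

-- A's quick-check loop: consecutive counter, break (= return true) at 8
def aQuick : List String → Nat → Bool
  | [], _ => false
  | line :: rest, consecutive =>
    if aShort line then
      if 8 ≤ consecutive + 1 then true else aQuick rest (consecutive + 1)
    else aQuick rest 0

-- A's reassembly while-loop; fuel = lines.length + 1 (the 'else' re-entry branch is
-- unreachable because the run was maximal, so the fuel never runs out)
def aLoop : Nat → List String → List String
  | 0, _ => []
  | fuel + 1, lines =>
    let frag := lines.takeWhile aShort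
    let rest := lines.dropWhile aShort
    let head_part :=
      if 8 ≤ frag.length then [PySem.Str.join "" (frag.map PySem.Str.strip)] else frag
    match rest with
    | [] => head_part
    | r :: rs =>
      let stripped := PySem.Str.strip r
      if PySem.Str.len stripped == 0 || 3 < PySem.Str.len stripped then
        head_part ++ r :: aLoop fuel rs
      else
        head_part ++ aLoop fuel (r :: rs)

def sanitize_response_text_py (text : String) : String :=
  if text = "" then text
  else
    let lines := (PySem.Str.split? text "\n").getD []
    if !aQuick lines 0 then text
    else PySem.Str.join "\n" (aLoop (lines.length + 1) lines)

-- ===== PORT B =====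
-- B's key: '1 <= len(line.strip()) <= 3'
def bShort (line : String) : Bool :=
  1 ≤ PySem.Str.len (PySem.Str.strip line) && PySem.Str.len (PySem.Str.strip line) ≤ 3

-- B's flush(): a pending run of 8+ very-short lines becomes one joined line
def bFlush (run : List String) : List String :=
  if 8 ≤ run.length then [PySem.Str.join "" (run.map PySem.Str.strip)] else run

-- B's single for-loop with the pending run accumulator
def bLoop : List String → List String → List String
  | [], run => bFlush run
  | line :: rest, run =>
    if bShort line then bLoop rest (run ++ [line])
    else bFlush run ++ line :: bLoop rest []

def sanitize_response_text_py_alt (text : String) : String :=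
  PySem.Str.join "\n" (bLoop ((PySem.Str.split? text "\n").getD []) [])

-- ===== PRECONDITION & SPEC =====
def Spec_sanitize_response_text_py (text : String) (out : String) : Prop := out = sanitize_response_text_py_alt text
instance (text : String) (out : String) : Decidable (Spec_sanitize_response_text_py text out) := by unfold Spec_sanitize_response_text_py; infer_instance

-- ===== CLAIM (what is proved, stated in full; the proofs are below) =====
def Claim_equal_sanitize_response_text_py : Prop := ∀ (text : String), Dom_sanitize_response_text_py text → Spec_sanitize_response_text_py text (sanitize_response_text_py text)

-- ===== LEMMAS AND PROOFS =====

-- Python's '\n'.join(s.split('\n')) == s, on the Chars-level splitter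
theorem join_go_acc (sep : List Char) (fuel : Nat) (l cur : List Char) (acc : List (List Char)) :
    PySem.Chars.splitOn.go sep fuel l cur acc =
      acc.reverse ++ PySem.Chars.splitOn.go sep fuel l cur [] := by
  induction fuel generalizing l cur acc with
  | zero => simp [PySem.Chars.splitOn.go]
  | succ n ih =>
    cases l with
    | nil => simp [PySem.Chars.splitOn.go]
    | cons c rest =>
      simp only [PySem.Chars.splitOn.go]
      split
      · rw [ih _ _ (cur.reverse :: acc), ih _ _ [cur.reverse]]
        simp
      · exact ih _ _ _

theorem go_ne_nil (sep : List Char) (fuel : Nat) (l cur : List Char) :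
    PySem.Chars.splitOn.go sep fuel l cur [] ≠ [] := by
  cases fuel with
  | zero => simp [PySem.Chars.splitOn.go]
  | succ n =>
    cases l with
    | nil => simp [PySem.Chars.splitOn.go]
    | cons c rest =>
      simp only [PySem.Chars.splitOn.go]
      split
      · rw [join_go_acc]
        simp
      · exact go_ne_nil sep n rest (c :: cur)

theorem join_go (sep : List Char) (hsep : sep ≠ []) (fuel : Nat) (l cur : List Char)
    (h : l.length ≤ fuel) :
    PySem.Chars.join sep (PySem.Chars.splitOn.go sep fuel l cur []) = cur.reverse ++ l := by
  induction fuel generalizing l cur with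
  | zero =>
    have : l = [] := List.eq_nil_of_length_eq_zero (Nat.le_zero.mp h)
    subst this
    simp [PySem.Chars.splitOn.go, PySem.Chars.join_singleton]
  | succ n ih =>
    cases l with
    | nil => simp [PySem.Chars.splitOn.go, PySem.Chars.join_singleton]
    | cons c rest =>
      simp only [PySem.Chars.splitOn.go]
      split
      · rename_i hpre
        rw [join_go_acc]
        simp only [List.reverse_cons, List.reverse_nil, List.nil_append]
        obtain ⟨q, qs, hrest⟩ := List.ne_nil_iff_exists_cons.mp
          (go_ne_nil sep n (List.drop sep.length (c :: rest)) [])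
        rw [hrest, List.singleton_append, PySem.Chars.join_cons_cons, ← hrest]
        have hfuel : (List.drop sep.length (c :: rest)).length ≤ n := by
          have hpos : 1 ≤ sep.length := List.length_pos_of_ne_nil hsep
          simp only [List.length_cons] at h
          simp only [List.length_drop, List.length_cons]
          omega
        rw [ih _ [] hfuel]
        -- sep ++ drop sep.length (c::rest) = c :: rest since sep is a prefix
        have hp : sep <+: (c :: rest) := List.isPrefixOf_iff_prefix.mp hpre
        obtain ⟨t, ht⟩ := hp
        simp [← ht]
      · rw [ih rest (c :: cur) (Nat.le_of_succ_le_succ h)]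
        simp

theorem join_split (text : String) :
    PySem.Str.join "\n" ((PySem.Str.split? text "\n").getD []) = text := by
  have hmap := PySem.Str.split?_map text "\n"
  have hsplit : PySem.Str.split? text "\n" ≠ none := by
    intro h
    rw [h] at hmap
    simp [PySem.Chars.split?] at hmap
  obtain ⟨ls, hls⟩ := Option.ne_none_iff_exists'.mp hsplit
  rw [hls]
  rw [hls] at hmap
  simp only [Option.map_some, PySem.Chars.split?] at hmap
  have hmap' : List.map String.toList ls = PySem.Chars.splitOn text.toList "\n".toList := by
    simpa using hmap
  apply String.toList_inj.mp
  rw [PySem.Str.toList_join, Option.getD_some, hmap', PySem.Chars.splitOn]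
  exact join_go _ (by decide) _ _ _ (Nat.le_succ _)

theorem aShort_eq_bShort (s : String) : aShort s = bShort s := rfl

-- A's 'next normal line' test is true for the first line after a maximal short run
theorem notShort_cond (r : String) (h : aShort r = false) :
    (PySem.Str.len (PySem.Str.strip r) == 0 || 3 < PySem.Str.len (PySem.Str.strip r)) = true := by
  unfold aShort at h
  simp only [PySem.Str.len_eq, Bool.and_eq_false_iff, decide_eq_false_iff_not, not_le] at h
  simp only [PySem.Str.len_eq, Bool.or_eq_true, beq_iff_eq, decide_eq_true_eq]
  omega

-- B absorbs a wholly-short prefix into the pending run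
theorem bLoop_absorb (frag : List String) (h : ∀ s ∈ frag, bShort s = true) :
    ∀ (rest run : List String), bLoop (frag ++ rest) run = bLoop rest (run ++ frag) := by
  induction frag with
  | nil => simp
  | cons f fs ih =>
    intro rest run
    have hf : bShort f = true := h f (by simp)
    simp only [List.cons_append, bLoop, hf, if_pos]
    rw [ih (fun s hs => h s (by simp [hs])) rest (run ++ [f])]
    simp

-- main loop equivalence: A's fueled while-loop computes B's single pass
theorem aLoop_eq_bLoop : ∀ (n : Nat) (lines : List String) (fuel : Nat),
    lines.length < fuel → lines.length ≤ n → aLoop fuel lines = bLoop lines [] := by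
  intro n
  induction n with
  | zero =>
    intro lines fuel h1 h2
    have : lines = [] := List.eq_nil_of_length_eq_zero (Nat.le_zero.mp h2)
    subst this
    cases fuel with
    | zero => simp at h1
    | succ f => simp [aLoop, bLoop, bFlush]
  | succ n ih =>
    intro lines fuel h1 h2
    obtain ⟨f, rfl⟩ : ∃ f, fuel = f + 1 := ⟨fuel - 1, by omega⟩
    have hdecomp : lines = lines.takeWhile aShort ++ lines.dropWhile aShort :=
      (List.takeWhile_append_dropWhile).symm
    have hfragshort : ∀ s ∈ lines.takeWhile aShort, bShort s = true := by
      intro s hs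
      rw [← aShort_eq_bShort]
      exact List.mem_takeWhile_imp hs
    have hB : bLoop lines [] = bLoop (lines.dropWhile aShort) (lines.takeWhile aShort) := by
      conv_lhs => rw [hdecomp]
      rw [bLoop_absorb _ hfragshort]
      simp
    simp only [aLoop]
    cases hrest : lines.dropWhile aShort with
    | nil =>
      rw [hB, hrest]
      simp [bLoop, bFlush]
    | cons r rs =>
      have hrshort : aShort r = false := by
        have h2 := List.head_dropWhile_not aShort (l := lines) (by rw [hrest]; simp)
        simp only [hrest, List.head_cons] at h2
        exact h2
      rw [hB, hrest]
      simp only [bLoop, aShort_eq_bShort r ▸ hrshort, Bool.false_eq_true, if_false]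
      rw [notShort_cond r hrshort]
      simp only [if_true]
      have hlen := congrArg List.length hdecomp
      rw [hrest] at hlen
      simp only [List.length_append, List.length_cons] at hlen
      rw [ih rs f (by omega) (by omega)]
      simp [bFlush]

-- when A's quick check finds no run of 8, B keeps every line
theorem bLoop_id : ∀ (lines : List String) (run : List String),
    run.length < 8 → aQuick lines run.length = false → bLoop lines run = run ++ lines := by
  intro lines
  induction lines with
  | nil =>
    intro run h8 _
    simp [bLoop, bFlush, Nat.not_le.mpr h8]
  | cons line rest ih =>
    intro run h8 hq
    by_cases hs : aShort line = true
    · simp only [aQuick, hs, if_true] at hq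
      have h18 : ¬ 8 ≤ run.length + 1 := by
        intro hc
        simp [hc] at hq
      rw [if_neg h18] at hq
      simp only [bLoop, ← aShort_eq_bShort, hs, if_true]
      have := ih (run ++ [line]) (by simp only [List.length_append, List.length_singleton]; omega) (by simpa using hq)
      rw [this]
      simp
    · have hs' : aShort line = false := Bool.eq_false_iff.mpr hs
      simp only [aQuick, hs', Bool.false_eq_true, if_false] at hq
      simp only [bLoop, ← aShort_eq_bShort, hs', Bool.false_eq_true, if_false]
      rw [bFlush, if_neg (Nat.not_le.mpr h8)]
      have := ih [] (by simp) (by simpa using hq)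
      rw [this]
      simp

-- ===== VERDICT (by name: the statement is the Claim_ definition above) =====
theorem sanitize_response_text_py_spec : Claim_equal_sanitize_response_text_py := by
  intro text _
  unfold Spec_sanitize_response_text_py
  by_cases hemp : text = ""
  · subst hemp
    decide
  · unfold sanitize_response_text_py sanitize_response_text_py_alt
    rw [if_neg hemp]
    set lines := (PySem.Str.split? text "\n").getD [] with hlines
    by_cases hq : aQuick lines 0 = true
    · simp only [hq, Bool.not_true, Bool.false_eq_true, if_false]
      rw [aLoop_eq_bLoop lines.length lines (lines.length + 1) (Nat.lt_succ_self _) (Nat.le_refl _)]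
    · have hq' : aQuick lines 0 = false := Bool.eq_false_iff.mpr hq
      simp only [hq', Bool.not_false, if_true]
      rw [bLoop_id lines [] (by simp) (by simpa using hq')]
      simp only [List.nil_append]
      exact (join_split text).symm
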